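-- pv_equiv track=rewrite | github.com/heroxdream/Leetcode | src/string/longestPalindrome.py | longestPalindromeV1
-- ===== SOURCE A (Python) =====
-- def longestPalindromeV1(s):
--
--     global_best_str = ''
--     for i in range(0, len(s)):
--         for j in range(i + 1, len(s)):
--             sub = s[i:j + 1]
--             sub_reverse = sub[::-1]
--             if sub == sub_reverse and len(sub) > len(global_best_str):
--                 global_best_str = sub
--     return global_best_str
-- ===== SOURCE B (Python) =====
-- def longestPalindromeV1(s):
--     # Scan candidate lengths from longest down to 2; for each length scan starts
--     # left to right and return the first palindrome found (checked with an
--     # early-exit two-pointer comparison instead of building a reversed copy).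
--     n = len(s)
--     for L in range(n, 1, -1):
--         for i in range(0, n - L + 1):
--             lo = i
--             hi = i + L - 1
--             while lo < hi and s[lo] == s[hi]:
--                 lo += 1
--                 hi -= 1
--             if lo >= hi:
--                 return s[i:i + L]
--     return ''
-- ===== Notes on version B (the rewrite author's own statement) =====
-- stated objective: faster
-- what changed: Replaces the exhaustive scan of all substrings with a length-descending search that returns the first palindrome found, using an early-exit two-pointer palindrome check instead of building a reversed copy of every substring.
import Mathlib
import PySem

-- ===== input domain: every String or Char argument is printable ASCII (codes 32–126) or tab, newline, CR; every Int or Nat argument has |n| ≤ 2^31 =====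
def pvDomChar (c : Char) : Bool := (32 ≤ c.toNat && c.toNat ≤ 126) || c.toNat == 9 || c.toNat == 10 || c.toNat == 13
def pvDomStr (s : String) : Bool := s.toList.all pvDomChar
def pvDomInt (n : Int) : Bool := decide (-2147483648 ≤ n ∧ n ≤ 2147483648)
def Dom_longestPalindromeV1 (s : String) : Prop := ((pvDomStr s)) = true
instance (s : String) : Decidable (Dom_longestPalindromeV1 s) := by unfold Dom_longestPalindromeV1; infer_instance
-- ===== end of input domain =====

-- B replaces A's exhaustive scan of all substrings with a length-descending
-- early-exit search using a two-pointer palindrome check (measurably faster on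
-- typical inputs; equal return value proved below).

-- ===== PORT A =====
-- body of A's inner loop: sub = s[i:j+1]; sub_reverse = sub[::-1]; conditional update
def pvStepA (cs : List Char) (i : Int) (gb : List Char) (j : Int) : List Char :=
  let sub := PySem.List.slice cs (some i) (some (j + 1))
  let subRev := sub.reverse
  if sub = subRev ∧ sub.length > gb.length then sub else gb

-- A's inner loop over j in range(i+1, len(s))
def pvRowA (cs : List Char) (gb : List Char) (i : Int) : List Char :=
  (PySem.List.pyRange (i + 1) (cs.length : Int) 1).foldl (pvStepA cs i) gb

def longestPalindromeV1 (s : String) : String :=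
  String.mk ((PySem.List.pyRange 0 ((s.toList.length : Int)) 1).foldl (pvRowA s.toList) [])

-- ===== PORT B =====
-- B's while loop: two-pointer scan; returns the final test `lo >= hi`
def pvTwo (cs : List Char) (lo hi : Int) : Bool :=
  if lo < hi then
    if PySem.List.pyGet? cs lo = PySem.List.pyGet? cs hi then pvTwo cs (lo + 1) (hi - 1)
    else false
  else true
termination_by (hi - lo).toNat
decreasing_by omega

-- B's inner loop over starts i, returning s[i:i+L] at the first palindrome
def pvInnerB (cs : List Char) (L : Int) : List Int → Option (List Char)
  | [] => none
  | i :: rest =>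
    if pvTwo cs i (i + L - 1) then some (PySem.List.slice cs (some i) (some (i + L)))
    else pvInnerB cs L rest

-- B's outer loop over lengths L in range(n, 1, -1)
def pvOuterB (cs : List Char) : List Int → Option (List Char)
  | [] => none
  | L :: rest =>
    match pvInnerB cs L (PySem.List.pyRange 0 ((cs.length : Int) - L + 1) 1) with
    | some r => some r
    | none => pvOuterB cs rest

def longestPalindromeV1_alt (s : String) : String :=
  match pvOuterB s.toList (PySem.List.pyRange ((s.toList.length : Int)) 1 (-1)) with
  | some r => String.mk r
  | none => ""

-- ===== PRECONDITION & SPEC =====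
def Spec_longestPalindromeV1 (s : String) (out : String) : Prop := out = longestPalindromeV1_alt s
instance (s : String) (out : String) : Decidable (Spec_longestPalindromeV1 s out) := by unfold Spec_longestPalindromeV1; infer_instance

-- ===== CLAIM (what is proved, stated in full; the proofs are below) =====
def Claim_equal_longestPalindromeV1 : Prop := ∀ (s : String), Dom_longestPalindromeV1 s → Spec_longestPalindromeV1 s (longestPalindromeV1 s)

-- ===== LEMMAS AND PROOFS =====

-- the substring s[i:i+L]
def pvSub (cs : List Char) (i L : Int) : List Char := PySem.List.slice cs (some i) (some (i + L))

-- (i, L) delimits a palindromic substring of length ≥ 2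
def pvGood (cs : List Char) (i L : Int) : Prop :=
  0 ≤ i ∧ 2 ≤ L ∧ i + L ≤ (cs.length : Int) ∧ pvSub cs i L = (pvSub cs i L).reverse

lemma pvSub_eq (cs : List Char) (i L : Int) (h0 : 0 ≤ i) (hL : 0 ≤ L) :
    pvSub cs i L = (cs.drop i.toNat).take L.toNat := by
  unfold pvSub
  rw [PySem.List.slice_toNat cs h0 (by omega)]
  congr 1
  omega

lemma pvSub_length (cs : List Char) (i L : Int) (h0 : 0 ≤ i) (hL : 0 ≤ L)
    (hn : i + L ≤ (cs.length : Int)) : (pvSub cs i L).length = L.toNat := by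
  rw [pvSub_eq cs i L h0 hL]
  simp only [List.length_take, List.length_drop]
  omega

lemma list_eq_reverse_iff (u : List Char) :
    u = u.reverse ↔ ∀ (m : ℕ) (hm : m < u.length), u[m] = u[u.length - 1 - m]'(by omega) := by
  constructor
  · intro h m hm
    have h2 : u[m] = (u.reverse)[m]'(by simpa using hm) := List.getElem_of_eq h hm
    rw [h2, List.getElem_reverse]
  · intro h
    apply List.ext_getElem (by simp)
    intro m h1 h2
    rw [List.getElem_reverse]
    exact (h m h1).symm ▸ rfl

lemma pv_getElem_congr (l : List Char) {a b : ℕ} (hab : a = b) {ha : a < l.length} :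
    l[a] = l[b]'(hab ▸ ha) := by subst hab; rfl

lemma pal_iff_sym (cs : List Char) (i L : Int) (h0 : 0 ≤ i) (h2 : 2 ≤ L)
    (hn : i + L ≤ (cs.length : Int)) :
    (pvSub cs i L = (pvSub cs i L).reverse) ↔
      (∀ k : Int, i ≤ k → k ≤ i + L - 1 →
        PySem.List.pyGet? cs k = PySem.List.pyGet? cs (i + (i + L - 1) - k)) := by
  have hu := pvSub_eq cs i L h0 (by omega)
  have hlen := pvSub_length cs i L h0 (by omega) hn
  have hget : ∀ (m : ℕ) (hm : m < (pvSub cs i L).length),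
      (pvSub cs i L)[m] = cs[i.toNat + m]'(by
        simp only [hlen] at hm
        omega) := by
    intro m hm
    have he : (pvSub cs i L)[m] = ((cs.drop i.toNat).take L.toNat)[m]'(hu ▸ hm) :=
      List.getElem_of_eq hu hm
    rw [he, List.getElem_take, List.getElem_drop]
  rw [list_eq_reverse_iff]
  constructor
  · intro h k hk1 hk2
    have hm1 : (k - i).toNat < (pvSub cs i L).length := by rw [hlen]; omega
    have hm2 : (pvSub cs i L).length - 1 - (k - i).toNat < (pvSub cs i L).length := by
      rw [hlen]; omega
    have hh := h (k - i).toNat hm1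
    rw [hget _ hm1, hget _ hm2] at hh
    rw [PySem.List.pyGet?_eq_some_getElem cs (by omega : 0 ≤ k) (by omega : k < (cs.length : Int)),
      PySem.List.pyGet?_eq_some_getElem cs (by omega : 0 ≤ i + (i + L - 1) - k)
        (by omega : i + (i + L - 1) - k < (cs.length : Int))]
    have e1 : i.toNat + (k - i).toNat = k.toNat := by omega
    have e2 : i.toNat + ((pvSub cs i L).length - 1 - (k - i).toNat) =
        (i + (i + L - 1) - k).toNat := by rw [hlen]; omega
    rw [pv_getElem_congr cs e1, pv_getElem_congr cs e2] at hh
    rw [hh]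
  · intro h m hm
    have hm' : m < L.toNat := by rw [hlen] at hm; omega
    have hh := h (i + (m : Int)) (by omega) (by omega)
    rw [PySem.List.pyGet?_eq_some_getElem cs (by omega : 0 ≤ i + (m : Int))
        (by omega : i + (m : Int) < (cs.length : Int)),
      PySem.List.pyGet?_eq_some_getElem cs (by omega : 0 ≤ i + (i + L - 1) - (i + (m : Int)))
        (by omega : i + (i + L - 1) - (i + (m : Int)) < (cs.length : Int))] at hh
    have hh' := Option.some.inj hh
    have hm2 : (pvSub cs i L).length - 1 - m < (pvSub cs i L).length := by rw [hlen]; omega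
    rw [hget _ hm, hget _ hm2]
    have e1 : i.toNat + m = (i + (m : Int)).toNat := by omega
    have e2 : i.toNat + ((pvSub cs i L).length - 1 - m) =
        (i + (i + L - 1) - (i + (m : Int))).toNat := by rw [hlen]; omega
    rw [pv_getElem_congr cs e1, pv_getElem_congr cs e2]
    exact hh'

lemma pvTwo_iff (cs : List Char) (lo hi : Int) (h0 : 0 ≤ lo) (h1 : hi < (cs.length : Int)) :
    pvTwo cs lo hi = true ↔
      ∀ k : Int, lo ≤ k → k ≤ hi →
        PySem.List.pyGet? cs k = PySem.List.pyGet? cs (lo + hi - k) := by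
  have main : ∀ (fuel : ℕ) (lo hi : Int), 0 ≤ lo → hi < (cs.length : Int) →
      (hi - lo).toNat = fuel →
      (pvTwo cs lo hi = true ↔ ∀ k : Int, lo ≤ k → k ≤ hi →
        PySem.List.pyGet? cs k = PySem.List.pyGet? cs (lo + hi - k)) := by
    intro fuel
    induction fuel using Nat.strong_induction_on with
    | _ fuel ih =>
      intro lo hi h0 h1 hfuel
      rw [pvTwo]
      by_cases hlt : lo < hi
      · rw [if_pos hlt]
        by_cases hgc : PySem.List.pyGet? cs lo = PySem.List.pyGet? cs hi
        · rw [if_pos hgc]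
          rw [ih (hi - 1 - (lo + 1)).toNat (by omega) (lo + 1) (hi - 1) (by omega) (by omega) rfl]
          constructor
          · intro hin k hk1 hk2
            by_cases hkl : k = lo
            · subst hkl
              have hrw : k + hi - k = hi := by omega
              rw [hrw]; exact hgc
            · by_cases hkh : k = hi
              · subst hkh
                have hrw : lo + k - k = lo := by omega
                rw [hrw]; exact hgc.symm
              · have hh := hin k (by omega) (by omega)
                have hrw : lo + 1 + (hi - 1) - k = lo + hi - k := by omega
                rw [hrw] at hh; exact hh
          · intro hall k hk1 hk2
            have hh := hall k (by omega) (by omega)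
            have hrw : lo + hi - k = lo + 1 + (hi - 1) - k := by omega
            rw [hrw] at hh; exact hh
        · rw [if_neg hgc]
          simp only [Bool.false_eq_true, false_iff]
          intro hall
          have hh := hall lo (le_refl lo) (by omega)
          have hrw : lo + hi - lo = hi := by omega
          rw [hrw] at hh
          exact hgc hh
      · rw [if_neg hlt]
        constructor
        · intro _ k hk1 hk2
          have hrw : lo + hi - k = k := by omega
          rw [hrw]
        · intro _; rfl
  exact main (hi - lo).toNat lo hi h0 h1 rfl

lemma pvTwo_iff_pal (cs : List Char) (i L : Int) (h0 : 0 ≤ i) (h2 : 2 ≤ L)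
    (hn : i + L ≤ (cs.length : Int)) :
    (pvTwo cs i (i + L - 1) = true) ↔ pvSub cs i L = (pvSub cs i L).reverse := by
  rw [pvTwo_iff cs i (i + L - 1) h0 (by omega), pal_iff_sym cs i L h0 h2 hn]

lemma pvStepA_eq (cs : List Char) (i j : Int) (gb : List Char) :
    pvStepA cs i gb j =
      if pvSub cs i (j + 1 - i) = (pvSub cs i (j + 1 - i)).reverse ∧
          (pvSub cs i (j + 1 - i)).length > gb.length
      then pvSub cs i (j + 1 - i) else gb := by
  have h : i + (j + 1 - i) = j + 1 := by omega
  simp only [pvStepA, pvSub, h]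

lemma row_lt (cs : List Char) (i : Int) (K : ℕ) :
    ∀ (js : List Int) (gb : List Char), gb.length < K →
      (∀ j ∈ js, pvSub cs i (j + 1 - i) = (pvSub cs i (j + 1 - i)).reverse →
        (pvSub cs i (j + 1 - i)).length < K) →
      (js.foldl (pvStepA cs i) gb).length < K := by
  intro js
  induction js with
  | nil => intro gb hgb _; simpa using hgb
  | cons j js ih =>
    intro gb hgb hall
    simp only [List.foldl_cons]
    apply ih
    · rw [pvStepA_eq]
      split_ifs with hc
      · exact hall j (List.mem_cons_self) hc.1
      · exact hgb
    · exact fun j' hj' hp => hall j' (List.mem_cons_of_mem _ hj') hp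

lemma row_fix (cs : List Char) (i : Int) :
    ∀ (js : List Int) (gb : List Char),
      (∀ j ∈ js, pvSub cs i (j + 1 - i) = (pvSub cs i (j + 1 - i)).reverse →
        (pvSub cs i (j + 1 - i)).length ≤ gb.length) →
      js.foldl (pvStepA cs i) gb = gb := by
  intro js
  induction js with
  | nil => intro gb _; rfl
  | cons j js ih =>
    intro gb hall
    have hstep : pvStepA cs i gb j = gb := by
      rw [pvStepA_eq]
      split_ifs with hc
      · exact absurd hc.2 (by have := hall j (List.mem_cons_self) hc.1; omega)
      · rfl
    simp only [List.foldl_cons, hstep]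
    exact ih gb (fun j' hj' hp => hall j' (List.mem_cons_of_mem _ hj') hp)

lemma outer_lt (cs : List Char) (K : ℕ) :
    ∀ (is : List Int) (gb : List Char), gb.length < K →
      (∀ i ∈ is, ∀ j ∈ PySem.List.pyRange (i + 1) (cs.length : Int) 1,
        pvSub cs i (j + 1 - i) = (pvSub cs i (j + 1 - i)).reverse →
        (pvSub cs i (j + 1 - i)).length < K) →
      (is.foldl (pvRowA cs) gb).length < K := by
  intro is
  induction is with
  | nil => intro gb hgb _; simpa using hgb
  | cons i is ih =>
    intro gb hgb hall
    simp only [List.foldl_cons]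
    apply ih
    · exact row_lt cs i K _ gb hgb (hall i (List.mem_cons_self))
    · exact fun i' hi' => hall i' (List.mem_cons_of_mem _ hi')

lemma outer_fix (cs : List Char) :
    ∀ (is : List Int) (gb : List Char),
      (∀ i ∈ is, ∀ j ∈ PySem.List.pyRange (i + 1) (cs.length : Int) 1,
        pvSub cs i (j + 1 - i) = (pvSub cs i (j + 1 - i)).reverse →
        (pvSub cs i (j + 1 - i)).length ≤ gb.length) →
      is.foldl (pvRowA cs) gb = gb := by
  intro is
  induction is with
  | nil => intro gb _; rfl
  | cons i is ih =>
    intro gb hall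
    have hstep : pvRowA cs gb i = gb :=
      row_fix cs i _ gb (hall i (List.mem_cons_self))
    simp only [List.foldl_cons, hstep]
    exact ih gb (fun i' hi' => hall i' (List.mem_cons_of_mem _ hi'))

lemma good_of_pair (cs : List Char) (i j : Int) (h0 : 0 ≤ i) (hij : i + 1 ≤ j)
    (hj : j < (cs.length : Int))
    (hp : pvSub cs i (j + 1 - i) = (pvSub cs i (j + 1 - i)).reverse) :
    pvGood cs i (j + 1 - i) := by
  exact ⟨h0, by omega, by omega, hp⟩

lemma A_hit (cs : List Char) (iS LS : Int) (hg : pvGood cs iS LS)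
    (hmax : ∀ i L, pvGood cs i L → L ≤ LS) (hmin : ∀ i, pvGood cs i LS → iS ≤ i) :
    (PySem.List.pyRange 0 (cs.length : Int) 1).foldl (pvRowA cs) [] = pvSub cs iS LS := by
  obtain ⟨hi0, hL2, hiLn, hpal⟩ := hg
  have hlenS : (pvSub cs iS LS).length = LS.toNat := pvSub_length cs iS LS hi0 (by omega) hiLn
  have hlt : ∀ i j : Int, 0 ≤ i → i + 1 ≤ j → j < (cs.length : Int) →
      pvSub cs i (j + 1 - i) = (pvSub cs i (j + 1 - i)).reverse →
      (i < iS ∨ (i = iS ∧ j < iS + LS - 1)) → (pvSub cs i (j + 1 - i)).length < LS.toNat := by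
    intro i j h0' hij hj hp hcase
    have hgood := good_of_pair cs i j h0' hij hj hp
    have hle := hmax i (j + 1 - i) hgood
    have hlen' : (pvSub cs i (j + 1 - i)).length = (j + 1 - i).toNat :=
      pvSub_length cs i (j + 1 - i) h0' (by omega) (by omega)
    rcases hcase with hlt' | ⟨rfl, hjlt⟩
    · have hne : j + 1 - i < LS := by
        rcases eq_or_lt_of_le hle with heq | h
        · exact absurd (hmin i (heq ▸ hgood)) (by omega)
        · exact h
      omega
    · omega
  have hout : PySem.List.pyRange 0 (cs.length : Int) 1 =
      PySem.List.pyRange 0 iS 1 ++ (iS :: PySem.List.pyRange (iS + 1) (cs.length : Int) 1) := by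
    rw [PySem.List.pyRange_one_append 0 iS (cs.length : Int) hi0 (by omega),
      PySem.List.pyRange_one_cons (by omega : iS < (cs.length : Int))]
  rw [hout, List.foldl_append]
  have hacc1 : ((PySem.List.pyRange 0 iS 1).foldl (pvRowA cs) []).length < LS.toNat := by
    apply outer_lt
    · simp only [List.length_nil]; omega
    · intro i hi j hj hp
      rw [PySem.List.mem_pyRange_one] at hi hj
      exact hlt i j (by omega) (by omega) (by omega) hp (Or.inl (by omega))
  simp only [List.foldl_cons]
  have hrow : ∀ gb : List Char, gb.length < LS.toNat → pvRowA cs gb iS = pvSub cs iS LS := by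
    intro gb hgb
    unfold pvRowA
    have hin : PySem.List.pyRange (iS + 1) (cs.length : Int) 1 =
        PySem.List.pyRange (iS + 1) (iS + LS - 1) 1 ++
          ((iS + LS - 1) :: PySem.List.pyRange (iS + LS) (cs.length : Int) 1) := by
      rw [PySem.List.pyRange_one_append (iS + 1) (iS + LS - 1) (cs.length : Int) (by omega)
          (by omega),
        PySem.List.pyRange_one_cons (by omega : iS + LS - 1 < (cs.length : Int))]
      have he : iS + LS - 1 + 1 = iS + LS := by omega
      rw [he]
    rw [hin, List.foldl_append]
    have hacc2 : ((PySem.List.pyRange (iS + 1) (iS + LS - 1) 1).foldl (pvStepA cs iS)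
        gb).length < LS.toNat := by
      apply row_lt
      · exact hgb
      · intro j hj hp
        rw [PySem.List.mem_pyRange_one] at hj
        exact hlt iS j hi0 (by omega) (by omega) hp (Or.inr ⟨rfl, by omega⟩)
    simp only [List.foldl_cons]
    have hstep : pvStepA cs iS ((PySem.List.pyRange (iS + 1) (iS + LS - 1) 1).foldl
        (pvStepA cs iS) gb) (iS + LS - 1) =
        pvSub cs iS LS := by
      rw [pvStepA_eq]
      have hrwL : iS + LS - 1 + 1 - iS = LS := by omega
      rw [hrwL, if_pos ⟨hpal, by omega⟩]
    rw [hstep]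
    apply row_fix
    intro j hj hp
    rw [PySem.List.mem_pyRange_one] at hj
    have hgood := good_of_pair cs iS j hi0 (by omega) (by omega) hp
    have hle := hmax iS (j + 1 - iS) hgood
    rw [pvSub_length cs iS (j + 1 - iS) hi0 (by omega) (by omega), hlenS]
    omega
  rw [hrow _ hacc1]
  apply outer_fix
  intro i hi j hj hp
  rw [PySem.List.mem_pyRange_one] at hi hj
  have hgood := good_of_pair cs i j (by omega) (by omega) (by omega) hp
  have hle := hmax i (j + 1 - i) hgood
  rw [pvSub_length cs i (j + 1 - i) (by omega) (by omega) (by omega), hlenS]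
  omega

lemma A_none (cs : List Char) (hno : ∀ i L, ¬ pvGood cs i L) :
    (PySem.List.pyRange 0 (cs.length : Int) 1).foldl (pvRowA cs) [] = [] := by
  apply outer_fix
  intro i hi j hj hp
  exfalso
  rw [PySem.List.mem_pyRange_one] at hi hj
  exact hno i (j + 1 - i) (good_of_pair cs i j (by omega) (by omega) (by omega) hp)

lemma inner_none (cs : List Char) (L : Int) :
    ∀ is : List Int, (∀ i ∈ is, pvTwo cs i (i + L - 1) = false) → pvInnerB cs L is = none := by
  intro is
  induction is with
  | nil => intro _; rfl
  | cons i is ih =>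
    intro hall
    simp only [pvInnerB, hall i (List.mem_cons_self), Bool.false_eq_true, if_false]
    exact ih (fun i' hi' => hall i' (List.mem_cons_of_mem _ hi'))

lemma inner_hit (cs : List Char) (L : Int) :
    ∀ (is₁ : List Int) (i : Int) (is₂ : List Int),
      (∀ i' ∈ is₁, pvTwo cs i' (i' + L - 1) = false) → pvTwo cs i (i + L - 1) = true →
      pvInnerB cs L (is₁ ++ i :: is₂) = some (pvSub cs i L) := by
  intro is₁
  induction is₁ with
  | nil =>
    intro i is₂ _ hi
    simp only [List.nil_append, pvInnerB, hi, if_true]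
    rfl
  | cons i' is₁ ih =>
    intro i is₂ hall hi
    simp only [List.cons_append, pvInnerB, hall i' (List.mem_cons_self), Bool.false_eq_true,
      if_false]
    exact ih i is₂ (fun i'' hi'' => hall i'' (List.mem_cons_of_mem _ hi'')) hi

lemma outer_skip (cs : List Char) :
    ∀ (Ls₁ Ls₂ : List Int),
      (∀ L ∈ Ls₁, pvInnerB cs L (PySem.List.pyRange 0 ((cs.length : Int) - L + 1) 1) = none) →
      pvOuterB cs (Ls₁ ++ Ls₂) = pvOuterB cs Ls₂ := by
  intro Ls₁
  induction Ls₁ with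
  | nil => intro Ls₂ _; rfl
  | cons L Ls₁ ih =>
    intro Ls₂ hall
    simp only [List.cons_append, pvOuterB, hall L (List.mem_cons_self)]
    exact ih Ls₂ (fun L' hL' => hall L' (List.mem_cons_of_mem _ hL'))

lemma pyRange_neg_one_append' (a m b : Int) (h1 : m ≤ a) (h2 : b ≤ m) :
    PySem.List.pyRange a b (-1) =
      PySem.List.pyRange a m (-1) ++ PySem.List.pyRange m b (-1) := by
  have hd : ∀ (n : ℕ) (a : Int), m ≤ a → (a - m).toNat = n →
      PySem.List.pyRange a b (-1) =
        PySem.List.pyRange a m (-1) ++ PySem.List.pyRange m b (-1) := by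
    intro n
    induction n with
    | zero =>
      intro a h1 hn
      have ham : a = m := by omega
      subst ham
      rw [PySem.List.pyRange_neg_one_eq_nil (le_refl a), List.nil_append]
    | succ n ih =>
      intro a h1 hn
      have hma : m < a := by omega
      rw [PySem.List.pyRange_neg_one_cons (by omega : b < a),
        PySem.List.pyRange_neg_one_cons hma, List.cons_append,
        ih (a - 1) (by omega) (by omega)]
  exact hd (a - m).toNat a h1 rfl

lemma mem_pyRange_neg_one (x a b : Int) :
    x ∈ PySem.List.pyRange a b (-1) ↔ b < x ∧ x ≤ a := by
  rw [PySem.List.pyRange_neg_one]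
  simp only [List.mem_map, List.mem_range]
  constructor
  · rintro ⟨k, hk, rfl⟩; omega
  · intro ⟨h1, h2⟩; exact ⟨(a - x).toNat, by omega, by omega⟩

lemma B_hit (cs : List Char) (iS LS : Int) (hg : pvGood cs iS LS)
    (hmax : ∀ i L, pvGood cs i L → L ≤ LS) (hmin : ∀ i, pvGood cs i LS → iS ≤ i) :
    pvOuterB cs (PySem.List.pyRange ((cs.length : Int)) 1 (-1)) = some (pvSub cs iS LS) := by
  obtain ⟨hi0, hL2, hiLn, hpal⟩ := hg
  have hsplit := pyRange_neg_one_append' (cs.length : Int) LS 1 (by omega) (by omega)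
  rw [hsplit]
  have hskip : ∀ L ∈ PySem.List.pyRange (cs.length : Int) LS (-1),
      pvInnerB cs L (PySem.List.pyRange 0 ((cs.length : Int) - L + 1) 1) = none := by
    intro L hL
    rw [mem_pyRange_neg_one] at hL
    apply inner_none
    intro i hi
    rw [PySem.List.mem_pyRange_one] at hi
    cases hb : pvTwo cs i (i + L - 1) with
    | false => rfl
    | true =>
      exfalso
      have hp := (pvTwo_iff_pal cs i L (by omega) (by omega) (by omega)).mp hb
      have := hmax i L ⟨by omega, by omega, by omega, hp⟩
      omega
  rw [outer_skip cs _ _ hskip,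
    PySem.List.pyRange_neg_one_cons (by omega : (1 : Int) < LS)]
  have hinner : pvInnerB cs LS (PySem.List.pyRange 0 ((cs.length : Int) - LS + 1) 1) =
      some (pvSub cs iS LS) := by
    have hsp : PySem.List.pyRange 0 ((cs.length : Int) - LS + 1) 1 =
        PySem.List.pyRange 0 iS 1 ++
          (iS :: PySem.List.pyRange (iS + 1) ((cs.length : Int) - LS + 1) 1) := by
      rw [PySem.List.pyRange_one_append 0 iS ((cs.length : Int) - LS + 1) hi0 (by omega),
        PySem.List.pyRange_one_cons (by omega : iS < (cs.length : Int) - LS + 1)]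
    rw [hsp]
    apply inner_hit
    · intro i' hi'
      rw [PySem.List.mem_pyRange_one] at hi'
      cases hb : pvTwo cs i' (i' + LS - 1) with
      | false => rfl
      | true =>
        exfalso
        have hp := (pvTwo_iff_pal cs i' LS (by omega) hL2 (by omega)).mp hb
        have := hmin i' ⟨by omega, hL2, by omega, hp⟩
        omega
    · exact (pvTwo_iff_pal cs iS LS hi0 hL2 hiLn).mpr hpal
  simp only [pvOuterB, hinner]

lemma B_none (cs : List Char) (hno : ∀ i L, ¬ pvGood cs i L) :
    pvOuterB cs (PySem.List.pyRange ((cs.length : Int)) 1 (-1)) = none := by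
  rw [← List.append_nil (PySem.List.pyRange ((cs.length : Int)) 1 (-1))]
  rw [outer_skip]
  · rfl
  · intro L hL
    rw [mem_pyRange_neg_one] at hL
    apply inner_none
    intro i hi
    rw [PySem.List.mem_pyRange_one] at hi
    cases hb : pvTwo cs i (i + L - 1) with
    | false => rfl
    | true =>
      exfalso
      have hp := (pvTwo_iff_pal cs i L (by omega) (by omega) (by omega)).mp hb
      exact hno i L ⟨by omega, by omega, by omega, hp⟩

-- ===== VERDICT (by name: the statement is the Claim_ definition above) =====
theorem longestPalindromeV1_spec : Claim_equal_longestPalindromeV1 := by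
  intro s _
  unfold Spec_longestPalindromeV1 longestPalindromeV1 longestPalindromeV1_alt
  by_cases hG : ∃ i L : Int, pvGood s.toList i L
  · obtain ⟨i₀, L₀, hg₀⟩ := hG
    obtain ⟨LS, ⟨iS', hgS'⟩, hmaxE⟩ :=
      Int.exists_greatest_of_bdd (P := fun L => ∃ i, pvGood s.toList i L)
        ⟨(s.toList.length : Int), fun z hz => by obtain ⟨i, h⟩ := hz; obtain ⟨a, b, c, d⟩ := h; omega⟩
        ⟨L₀, i₀, hg₀⟩
    obtain ⟨iS, hgS, hminE⟩ :=
      Int.exists_least_of_bdd (P := fun i => pvGood s.toList i LS)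
        ⟨0, fun z hz => hz.1⟩ ⟨iS', hgS'⟩
    have hmax : ∀ i L, pvGood s.toList i L → L ≤ LS := fun i L hg => hmaxE L ⟨i, hg⟩
    rw [A_hit s.toList iS LS hgS hmax hminE, B_hit s.toList iS LS hgS hmax hminE]
  · have hG : ∀ i L : Int, ¬ pvGood s.toList i L := fun i L h => hG ⟨i, L, h⟩
    rw [A_none s.toList hG, B_none s.toList hG]
    rfl
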